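-- pv_equiv track=rewrite | github.com/pypi-data/pypi-mirror-368 | packages/neatfile/neatfile-4.1.0.tar.gz/neatfile-4.1.0/src/neatfile/utils/strings.py | match_case
-- ===== SOURCE A (Python) =====
-- def match_case(tokens: list[str], match_case_list: tuple[str, ...] = ()) -> list[str]:
--     """Match the case of tokens against a reference list of properly cased words.
--
--     Compare each token against match_case_list and update its case to match if found. Preserve original case for unmatched tokens.
--
--     Args:
--         tokens (list[str]): List of tokens to process for case matching
--         match_case_list (tuple[str, ...], optional): Reference list of properly cased words. Defaults to ().
--
--     Returns:
--         list[str]: List of tokens with case adjusted to match reference list where applicable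
--     """
--     case_mapping = {word.lower(): word for word in match_case_list}
--
--     # Process each token
--     result = []
--     for token in tokens:
--         # Check if the lowercase version of the token exists in our mapping
--         if token.lower() in case_mapping:
--             # Replace with the properly cased version from match_case_list
--             result.append(case_mapping[token.lower()])
--         else:
--             # Keep the original token
--             result.append(token)
--
--     return result
-- ===== SOURCE B (Python) =====
-- def match_case(tokens: list[str], match_case_list: tuple[str, ...] = ()) -> list[str]:
--     """Recase tokens by loop interchange: iterate over the reference words and
--     overwrite every matching position of the result in place.
--
--     Later reference words overwrite earlier ones, so the last case-insensitive
--     match wins (same result as the original's last-write-wins dict).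
--     """
--     result = list(tokens)
--     lowers = [t.lower() for t in tokens]
--     for word in match_case_list:
--         wl = word.lower()
--         for i, tl in enumerate(lowers):
--             if tl == wl:
--                 result[i] = word
--     return result
-- ===== Notes on version B (the rewrite author's own statement) =====
-- stated objective: alternative
-- what changed: B interchanges the loops: instead of A's precomputed lowercase->word dict looked up per token, B walks the reference list in the outer loop and overwrites every matching position of a result array in place, so later reference words naturally win.
import Mathlib
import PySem

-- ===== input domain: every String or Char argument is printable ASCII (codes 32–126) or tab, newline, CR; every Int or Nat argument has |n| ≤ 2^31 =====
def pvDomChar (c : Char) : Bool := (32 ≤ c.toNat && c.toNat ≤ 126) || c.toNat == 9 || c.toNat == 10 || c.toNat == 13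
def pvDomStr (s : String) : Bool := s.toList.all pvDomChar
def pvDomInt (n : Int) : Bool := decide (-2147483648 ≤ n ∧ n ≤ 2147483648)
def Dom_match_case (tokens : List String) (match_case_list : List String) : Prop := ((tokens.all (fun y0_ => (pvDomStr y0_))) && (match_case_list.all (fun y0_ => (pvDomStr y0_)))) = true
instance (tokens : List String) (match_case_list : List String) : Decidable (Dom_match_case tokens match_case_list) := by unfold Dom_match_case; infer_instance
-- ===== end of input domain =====

-- B interchanges A's loops: outer loop over the reference words, overwriting every
-- matching position of a result array in place (alternative decomposition, same result).

-- ===== PORT A =====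
def match_case (tokens : List String) (match_case_list : List String) : List String :=
  let case_mapping : PySem.Dict String String :=
    match_case_list.foldl (fun d w => d.insert (PySem.Str.lower w) w) PySem.Dict.empty
  tokens.foldl (fun result token =>
    if case_mapping.contains (PySem.Str.lower token) then
      result ++ [case_mapping.getD (PySem.Str.lower token) token]
    else
      result ++ [token]) []

-- ===== PORT B =====
-- result[i] := word for every i with lowers[i] == word.lower(); the indexed in-place
-- update over (result, lowers) is rendered as a map over their zip (positions aligned,
-- result always keeps tokens' length).
def match_case_alt (tokens : List String) (match_case_list : List String) : List String :=
  let lowers := tokens.map PySem.Str.lower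
  match_case_list.foldl (fun result word =>
    let wl := PySem.Str.lower word
    (result.zip lowers).map (fun p => if p.2 = wl then word else p.1)) tokens

-- ===== PRECONDITION & SPEC =====
def Spec_match_case (tokens : List String) (match_case_list : List String) (out : List String) : Prop := out = match_case_alt tokens match_case_list
instance (tokens : List String) (match_case_list : List String) (out : List String) : Decidable (Spec_match_case tokens match_case_list out) := by unfold Spec_match_case; infer_instance

-- ===== CLAIM (what is proved, stated in full; the proofs are below) =====
def Claim_equal_match_case : Prop := ∀ (tokens : List String) (match_case_list : List String), Dom_match_case tokens match_case_list → Spec_match_case tokens match_case_list (match_case tokens match_case_list)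

-- ===== LEMMAS AND PROOFS =====

-- the dict built by A's comprehension, looked up at k with default c, is a last-match scan
theorem lookup_foldl_insert_lower (mcl : List String) (d : PySem.Dict String String)
    (k c : String) :
    ((mcl.foldl (fun d w => d.insert (PySem.Str.lower w) w) d).get? k).getD c
      = mcl.foldl (fun resolved w => if PySem.Str.lower w = k then w else resolved)
          ((d.get? k).getD c) := by
  induction mcl generalizing d with
  | nil => simp
  | cons w ws ih =>
    simp only [List.foldl_cons]
    rw [ih, PySem.Dict.get?_insert]
    by_cases h : k = PySem.Str.lower w
    · rw [if_pos h, if_pos h.symm]; simp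
    · rw [if_neg h, if_neg (fun hh => h hh.symm)]

-- the contains-guarded lookup in A is just get? with default
theorem contains_getD (d : PySem.Dict String String) (k c : String) :
    (if d.contains k then d.getD k c else c) = (d.get? k).getD c := by
  rw [PySem.Dict.contains_eq_isSome_get?, PySem.Dict.getD_eq_get?_getD]
  cases d.get? k <;> simp

def mcDict (mcl : List String) : PySem.Dict String String :=
  mcl.foldl (fun d w => d.insert (PySem.Str.lower w) w) PySem.Dict.empty

theorem elem_eq (mcl : List String) (t : String) :
    (if (mcDict mcl).contains (PySem.Str.lower t) then (mcDict mcl).getD (PySem.Str.lower t) t else t)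
      = mcl.foldl (fun resolved w => if PySem.Str.lower w = PySem.Str.lower t then w else resolved) t := by
  rw [contains_getD]
  simpa [mcDict] using lookup_foldl_insert_lower mcl PySem.Dict.empty (PySem.Str.lower t) t

-- A's fold is the elementwise last-match scan
theorem a_fold (mcl : List String) (ts acc : List String) :
    ts.foldl (fun result token =>
        if (mcDict mcl).contains (PySem.Str.lower token) then
          result ++ [(mcDict mcl).getD (PySem.Str.lower token) token]
        else result ++ [token]) acc
      = acc ++ ts.map (fun t =>
          mcl.foldl (fun resolved w => if PySem.Str.lower w = PySem.Str.lower t then w else resolved) t) := by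
  induction ts generalizing acc with
  | nil => simp
  | cons t ts ih =>
    simp only [List.foldl_cons, List.map_cons]
    have he := elem_eq mcl t
    split_ifs at he ⊢ with hc
    · rw [ih, ← he]; simp
    · rw [ih, ← he]; simp

-- zipping an updated list back against the same right column
theorem zip_map_update {α β : Type} (xs : List α) (ys : List β) (f : α × β → α)
    (h : xs.length = ys.length) :
    ((xs.zip ys).map f).zip ys = (xs.zip ys).map (fun p => (f p, p.2)) := by
  induction xs generalizing ys with
  | nil => simp
  | cons x xs ih =>
    cases ys with
    | nil => simp at h
    | cons y ys => simp_all

-- loop interchange: B's fold over reference words = per-element last-match scan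
theorem interchange (mcl : List String) (res lowers : List String)
    (h : res.length = lowers.length) :
    mcl.foldl (fun result word =>
        (result.zip lowers).map (fun p => if p.2 = PySem.Str.lower word then word else p.1)) res
      = (res.zip lowers).map (fun p =>
          mcl.foldl (fun v w => if PySem.Str.lower w = p.2 then w else v) p.1) := by
  induction mcl generalizing res with
  | nil =>
    simp only [List.foldl_nil]
    symm
    simpa using List.map_fst_zip (le_of_eq h)
  | cons w ws ih =>
    simp only [List.foldl_cons]
    rw [ih _ (by simp [h])]
    rw [zip_map_update _ _ _ h]
    rw [List.map_map]
    apply List.map_congr_left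
    intro p _
    simp only [Function.comp_apply]
    by_cases hp : p.2 = PySem.Str.lower w
    · simp [hp]
    · rw [if_neg hp, if_neg (Ne.symm hp)]

theorem zip_self_map {α β : Type} (xs : List α) (f : α → β) :
    xs.zip (xs.map f) = xs.map (fun x => (x, f x)) := by
  induction xs with
  | nil => simp
  | cons x xs ih => simp [ih]

-- ===== VERDICT (by name: the statement is the Claim_ definition above) =====
theorem match_case_spec : Claim_equal_match_case := by
  intro tokens mcl _
  unfold Spec_match_case match_case match_case_alt
  have ha := a_fold mcl tokens []
  simp only [mcDict] at ha
  rw [ha]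
  have hb := interchange mcl tokens (tokens.map PySem.Str.lower) (by simp)
  rw [hb]
  rw [zip_self_map tokens PySem.Str.lower, List.map_map]
  simp
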